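-- pv_equiv track=rewrite | github.com/personalizedrefrigerator/AlmostMake | almost_make/utils/shellUtil/runner.py | isQuoted
-- ===== SOURCE A (Python) =====
-- def isQuoted(text):
--     if len(text) < 2:
--         return False
--     if text[0] != text[-1]: # Must start and end with the same character.
--         return False
--     if not text[0] in { '"', "'" }:
--         return False
--
--     startQuote = text[0]
--
--     escaped = False
--
--     text = text[1:-1] # Remove starting & ending...
--
--     # If something would have broken us out of the quote...
--     for char in text:
--         if char == startQuote and not escaped:
--             return False # ... then it isn't completely quoted.
--         elif char == '\\' and not escaped:
--             escaped = True
--         elif escaped: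
--             escaped = False
--
--     # If the ending quote would have been escaped, it isn't quoted.
--     return not escaped
-- ===== SOURCE B (Python) =====
-- def isQuoted(text):
--     if len(text) < 2 or text[0] != text[-1] or text[0] not in ('"', "'"):
--         return False
--     q = text[0]
--     parts = text[1:-1].split(q)
--
--     def oddSlashes(p):
--         # number of trailing backslashes, via rstrip
--         return (len(p) - len(p.rstrip('\\'))) % 2 == 1
--
--     # every interior occurrence of q must be escaped (odd backslash run before it),
--     # and the closing quote must not be escaped
--     return all(oddSlashes(p) for p in parts[:-1]) and not oddSlashes(parts[-1])
-- ===== Notes on version B (the rewrite author's own statement) =====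
-- stated objective: alternative
-- what changed: Replaces A's single-pass escaped-flag state machine with a staged decomposition: split the inner string on the quote character, then accept iff every piece before a quote ends in an odd run of backslashes (computed by rstrip) and the last piece ends in an even run.
import Mathlib
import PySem

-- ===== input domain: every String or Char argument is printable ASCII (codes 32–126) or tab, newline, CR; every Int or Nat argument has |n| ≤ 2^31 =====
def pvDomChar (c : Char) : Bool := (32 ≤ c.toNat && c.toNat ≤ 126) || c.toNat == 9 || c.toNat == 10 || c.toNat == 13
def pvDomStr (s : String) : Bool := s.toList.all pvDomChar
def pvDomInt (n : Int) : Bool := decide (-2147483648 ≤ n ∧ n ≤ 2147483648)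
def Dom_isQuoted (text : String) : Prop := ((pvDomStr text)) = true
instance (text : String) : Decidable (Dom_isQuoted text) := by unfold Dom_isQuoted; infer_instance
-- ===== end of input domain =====

-- B replaces A's escaped-flag state machine with a staged split-on-quote + trailing-backslash-parity check (objective: alternative decomposition).


-- ===== PORT A =====
-- A's for-loop over the inner characters, carrying the 'escaped' flag; early 'return False' = result false
def isQuotedLoopA (q : Char) : List Char → Bool → Bool
  | [], escaped => !escaped
  | c :: rest, escaped =>
    if c == q && !escaped then false
    else if c == '\\' && !escaped then isQuotedLoopA q rest true
    else if escaped then isQuotedLoopA q rest false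
    else isQuotedLoopA q rest escaped

def isQuoted (text : String) : Bool :=
  let cs := text.toList
  if cs.length < 2 then false
  else if cs.getD 0 ' ' != PySem.List.pyGetD cs (-1) ' ' then false
  else if !(cs.getD 0 ' ' == '"' || cs.getD 0 ' ' == '\'') then false
  else
    let startQuote := cs.getD 0 ' '
    let inner := PySem.List.slice cs (some 1) (some (-1))  -- text[1:-1]
    isQuotedLoopA startQuote inner false

-- ===== PORT B =====
-- len(p) - len(p.rstrip('\\')): the number of trailing backslashes of p; exact for rstrip with the single char '\\'.
-- oddSlashes p = that count is odd
def oddSlashes (p : List Char) : Bool :=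
  (p.reverse.takeWhile (fun c => c == '\\')).length % 2 == 1

def isQuoted_alt (text : String) : Bool :=
  let cs := text.toList
  if cs.length < 2 || cs.getD 0 ' ' != PySem.List.pyGetD cs (-1) ' '
      || !(cs.getD 0 ' ' == '"' || cs.getD 0 ' ' == '\'') then false
  else
    let q := cs.getD 0 ' '
    -- text[1:-1].split(q); List.splitOn on the single char q matches Python str.split for a one-char separator
    let parts := List.splitOn q (PySem.List.slice cs (some 1) (some (-1)))
    -- all(oddSlashes(p) for p in parts[:-1]) and not oddSlashes(parts[-1])
    parts.dropLast.all oddSlashes && !(oddSlashes (parts.getLastD []))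

-- ===== PRECONDITION & SPEC =====
def Spec_isQuoted (text : String) (out : Bool) : Prop := out = isQuoted_alt text
instance (text : String) (out : Bool) : Decidable (Spec_isQuoted text out) := by unfold Spec_isQuoted; infer_instance

-- ===== CLAIM (what is proved, stated in full; the proofs are below) =====
def Claim_equal_isQuoted : Prop := ∀ (text : String), Dom_isQuoted text → Spec_isQuoted text (isQuoted text)

-- ===== LEMMAS AND PROOFS =====

-- the pure flag transition of A's loop on a quote-free chunk
def flagA : List Char → Bool → Bool
  | [], esc => esc
  | c :: t, esc => flagA t (c == '\\' && !esc)

theorem flagA_append (xs ys : List Char) (esc : Bool) :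
    flagA (xs ++ ys) esc = flagA ys (flagA xs esc) := by
  induction xs generalizing esc with
  | nil => rfl
  | cons c t ih => simp [flagA, ih]

-- flagA from false computes the parity of the trailing backslash run
theorem flagA_eq_oddSlashes (p : List Char) : flagA p false = oddSlashes p := by
  induction p using List.reverseRecOn with
  | nil => rfl
  | append_singleton p c ih =>
    rw [flagA_append, ih]
    by_cases hc : c = '\\'
    · subst hc
      have h2 : ∀ k : Nat, (!(k % 2 == 1)) = ((k + 1) % 2 == 1) := by
        intro k; rcases Nat.mod_two_eq_zero_or_one k with h | h <;> simp [h, Nat.add_mod]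
      simp [flagA, oddSlashes, h2]
    · simp [flagA, oddSlashes, hc]

-- on a chunk without q, A's loop just runs the flag machine
theorem loopA_chunk (q : Char) (p rest : List Char) (hp : q ∉ p) (esc : Bool) :
    isQuotedLoopA q (p ++ rest) esc = isQuotedLoopA q rest (flagA p esc) := by
  induction p generalizing esc with
  | nil => rfl
  | cons c t ih =>
    have hc : c ≠ q := fun e => hp (e ▸ List.mem_cons_self)
    have ht : q ∉ t := fun h => hp (List.mem_cons_of_mem _ h)
    rw [List.cons_append, isQuotedLoopA]
    rw [if_neg (by simp [hc])]
    by_cases hbs : c = '\\'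
    · cases esc with
      | false =>
        rw [if_pos (by simp [hbs]), ih ht]
        simp [flagA, hbs]
      | true =>
        rw [if_neg (by simp), if_pos rfl, ih ht]
        simp [flagA]
    · have hbs' : (c == '\\') = false := by simp [hbs]
      cases esc with
      | false =>
        rw [if_neg (by simp [hbs]), if_neg (by simp), ih ht]
        simp [flagA, hbs']
      | true =>
        rw [if_neg (by simp), if_pos rfl, ih ht]
        simp [flagA]

-- splitOn facts
theorem splitOn_cons_ne {c q : Char} (hc : c ≠ q) (cs : List Char) :
    List.splitOn q (c :: cs) = (List.splitOn q cs).modifyHead (List.cons c) := by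
  simp [List.splitOn, List.splitOnP_cons, hc]

theorem splitOn_cons_eq (q : Char) (cs : List Char) :
    List.splitOn q (q :: cs) = [] :: List.splitOn q cs := by
  simp [List.splitOn, List.splitOnP_cons]

theorem splitOn_ne_nil (q : Char) (cs : List Char) : List.splitOn q cs ≠ [] := by
  induction cs with
  | nil => simp [List.splitOn_nil]
  | cons c t ih =>
    by_cases hc : c = q
    · subst hc; rw [splitOn_cons_eq]; simp
    · rw [splitOn_cons_ne hc]
      cases h : List.splitOn q t with
      | nil => exact absurd h ih
      | cons a l => simp

theorem splitOn_not_mem {q : Char} {cs : List Char} (h : q ∉ cs) :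
    List.splitOn q cs = [cs] := by
  induction cs with
  | nil => simp [List.splitOn_nil]
  | cons c t ih =>
    have hc : c ≠ q := fun e => h (e ▸ List.mem_cons_self)
    rw [splitOn_cons_ne hc, ih (fun hm => h (List.mem_cons_of_mem _ hm))]
    rfl

theorem splitOn_append {q : Char} {p : List Char} (hp : q ∉ p) (rest : List Char) :
    List.splitOn q (p ++ q :: rest) = p :: List.splitOn q rest := by
  induction p with
  | nil => simpa using splitOn_cons_eq q rest
  | cons c t ih =>
    have hc : c ≠ q := fun e => hp (e ▸ List.mem_cons_self)
    rw [List.cons_append, splitOn_cons_ne hc, ih (fun hm => hp (List.mem_cons_of_mem _ hm))]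
    rfl

-- decompose a list containing q at its first occurrence
theorem exists_chunk {q : Char} {cs : List Char} (h : q ∈ cs) :
    ∃ p rest, cs = p ++ q :: rest ∧ q ∉ p := by
  induction cs with
  | nil => cases h
  | cons c t ih =>
    by_cases hc : c = q
    · exact ⟨[], t, by simp [hc], by simp⟩
    · have h' : q ∈ t := by
        rcases List.mem_cons.mp h with e | m
        · exact absurd e.symm hc
        · exact m
      rcases ih h' with ⟨p, rest, he, hp⟩
      refine ⟨c :: p, rest, by simp [he], ?_⟩
      intro hm
      rcases List.mem_cons.mp hm with e | m
      · exact hc e.symm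
      · exact hp m

-- B's staged check on the split pieces
def checkB (parts : List (List Char)) : Bool :=
  parts.dropLast.all oddSlashes && !(oddSlashes (parts.getLastD []))

-- core: A's flag loop equals B's parity check on the split
theorem loopA_eq_checkB (q : Char) :
    ∀ cs : List Char, isQuotedLoopA q cs false = checkB (List.splitOn q cs) := by
  intro cs
  induction hn : cs.length using Nat.strong_induction_on generalizing cs with
  | _ n ih =>
  by_cases h : q ∈ cs
  · rcases exists_chunk h with ⟨p, rest, he, hp⟩
    subst he
    rw [loopA_chunk q p _ hp false, flagA_eq_oddSlashes, splitOn_append hp]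
    have hlen : rest.length < n := by
      simp [List.length_append] at hn; omega
    have ihr := ih rest.length hlen rest rfl
    obtain ⟨a, l, hsp⟩ : ∃ a l, List.splitOn q rest = a :: l := by
      cases hsp : List.splitOn q rest with
      | nil => exact absurd hsp (splitOn_ne_nil q rest)
      | cons a l => exact ⟨a, l, rfl⟩
    cases hop : oddSlashes p with
    | false => simp [isQuotedLoopA, hop, checkB, hsp]
    | true => simp [isQuotedLoopA, hop, ihr, checkB, hsp]
  · rw [splitOn_not_mem h]
    have hA := loopA_chunk q cs [] h false
    rw [List.append_nil] at hA
    rw [hA, show ∀ e, isQuotedLoopA q [] e = !e from fun _ => rfl, flagA_eq_oddSlashes]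
    simp [checkB]

-- ===== VERDICT (by name: the statement is the Claim_ definition above) =====
theorem isQuoted_spec : Claim_equal_isQuoted := by
  intro text _
  unfold Spec_isQuoted isQuoted isQuoted_alt
  by_cases h1 : text.toList.length < 2
  · have h1' : text.length ≤ 1 := by rw [← String.length_toList]; omega
    simp [h1']
  · simp
    by_cases hQ : text.toList[0]?.getD ' ' = '"' ∨ text.toList[0]?.getD ' ' = '\''
    · rw [loopA_eq_checkB]
      simp [checkB, Bool.and_assoc]
    · have hz : (decide (text.toList[0]?.getD ' ' = '"')
          || decide (text.toList[0]?.getD ' ' = '\'')) = false := by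
        simp [not_or.mp hQ]
      simp [hz]
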